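-- pv_equiv track=rewrite | github.com/jrweis01/GM | compare_results.py | split_objects_by_lables
-- ===== SOURCE A (Python) =====
-- def split_objects_by_lables(objects):
--     car_objects = []
--     bus_objects = []
--     truck_objects = []
--     bicycle_objects = []
--     person_objects = []
--     unknown_objects = []
--     bird_objects = []
--     potted_plant_objects = []
--     cell_phone_objects = []
--     all_sorted_objects = {}
--     for object in objects:
--         if object['label'] == 'bicycle':
--             bicycle_objects.append(object)
--         elif object['label'] == 'person':
--             person_objects.append(object)
--         elif object['label'] == 'car':
--             car_objects.append(object)
--         elif object['label'] == 'truck':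
--             truck_objects.append(object)
--         elif object['label'] == 'bus':
--             bus_objects.append(object)
--         elif object['label'] == 'cell phone':
--             cell_phone_objects.append(object)
--         elif object['label'] == 'potted plant':
--             potted_plant_objects.append(object)
--         elif object['label'] == 'bird':
--             bird_objects.append(object)
--         else:
--             unknown_objects.append(object)
--
--     all_sorted_objects['persons'] = person_objects
--     all_sorted_objects['bicycle'] = bicycle_objects
--     all_sorted_objects['car'] = car_objects
--     all_sorted_objects['bus'] = bus_objects
--     all_sorted_objects['truck'] = truck_objects
--     all_sorted_objects['cell phone'] = cell_phone_objects
--     all_sorted_objects['potted_plants'] = potted_plant_objects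
--     all_sorted_objects['bird'] = bird_objects
--     all_sorted_objects['unknown'] = unknown_objects
--
--     return all_sorted_objects
-- ===== SOURCE B (Python) =====
-- _BUCKETS = [('person', 'persons'), ('bicycle', 'bicycle'), ('car', 'car'),
--             ('bus', 'bus'), ('truck', 'truck'), ('cell phone', 'cell phone'),
--             ('potted plant', 'potted_plants'), ('bird', 'bird')]
--
-- def split_objects_by_lables(objects):
--     # one independent filter pass per output key; no mutable buckets
--     result = {out: [o for o in objects if o['label'] == lbl] for lbl, out in _BUCKETS}
--     known = [lbl for lbl, _ in _BUCKETS]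
--     result['unknown'] = [o for o in objects if o['label'] not in known]
--     return result
-- ===== Notes on version B (the rewrite author's own statement) =====
-- stated objective: simpler
-- what changed: Replaces A's single bucketing loop that dispatches each object through an if/elif chain into nine mutable lists with nine independent in-order filter passes over the input, one per output key (plus a not-in filter for 'unknown'), with no mutable accumulator state at all.
import Mathlib
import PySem

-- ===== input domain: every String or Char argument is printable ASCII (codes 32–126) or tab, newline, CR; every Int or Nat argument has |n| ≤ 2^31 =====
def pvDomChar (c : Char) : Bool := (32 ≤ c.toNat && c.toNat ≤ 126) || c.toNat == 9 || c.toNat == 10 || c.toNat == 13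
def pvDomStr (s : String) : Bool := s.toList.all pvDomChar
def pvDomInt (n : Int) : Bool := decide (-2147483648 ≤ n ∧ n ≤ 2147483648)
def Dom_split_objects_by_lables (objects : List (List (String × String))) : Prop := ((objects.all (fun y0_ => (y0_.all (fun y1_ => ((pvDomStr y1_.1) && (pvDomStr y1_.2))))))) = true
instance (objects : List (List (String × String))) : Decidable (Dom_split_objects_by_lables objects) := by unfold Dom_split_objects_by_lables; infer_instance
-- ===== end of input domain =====

-- B replaces A's single if/elif bucketing loop over nine mutable lists with nine
-- independent in-order filter passes, one per output key (simpler decomposition, same cost).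


-- shared primitive: object['label'] (first-match lookup on the assoc list; Pre_ guarantees the key exists)
def pvLbl (o : List (String × String)) : String := ((PySem.Dict.mk o).get? "label").getD ""

-- ===== PORT A =====
structure StA where
  car : List (List (String × String))
  bus : List (List (String × String))
  truck : List (List (String × String))
  bicycle : List (List (String × String))
  person : List (List (String × String))
  unknown : List (List (String × String))
  bird : List (List (String × String))
  potted : List (List (String × String))
  cell : List (List (String × String))
  deriving Repr, DecidableEq

def stepA (s : StA) (o : List (String × String)) : StA :=
  if pvLbl o == "bicycle" then { s with bicycle := s.bicycle ++ [o] }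
  else if pvLbl o == "person" then { s with person := s.person ++ [o] }
  else if pvLbl o == "car" then { s with car := s.car ++ [o] }
  else if pvLbl o == "truck" then { s with truck := s.truck ++ [o] }
  else if pvLbl o == "bus" then { s with bus := s.bus ++ [o] }
  else if pvLbl o == "cell phone" then { s with cell := s.cell ++ [o] }
  else if pvLbl o == "potted plant" then { s with potted := s.potted ++ [o] }
  else if pvLbl o == "bird" then { s with bird := s.bird ++ [o] }
  else { s with unknown := s.unknown ++ [o] }

def split_objects_by_lables (objects : List (List (String × String))) : List (String × List (List (String × String))) :=
  let s := objects.foldl stepA ⟨[], [], [], [], [], [], [], [], []⟩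
  [("persons", s.person), ("bicycle", s.bicycle), ("car", s.car), ("bus", s.bus),
   ("truck", s.truck), ("cell phone", s.cell), ("potted_plants", s.potted),
   ("bird", s.bird), ("unknown", s.unknown)]

-- ===== PORT B =====
-- Source B's _BUCKETS table of (label, output key) pairs
def pvBuckets : List (String × String) :=
  [("person", "persons"), ("bicycle", "bicycle"), ("car", "car"), ("bus", "bus"),
   ("truck", "truck"), ("cell phone", "cell phone"), ("potted plant", "potted_plants"),
   ("bird", "bird")]

def split_objects_by_lables_alt (objects : List (List (String × String))) : List (String × List (List (String × String))) :=
  (pvBuckets.map (fun p => (p.2, objects.filter (fun o => pvLbl o == p.1)))) ++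
    [("unknown", objects.filter (fun o => !((pvBuckets.map Prod.fst).any (fun l => pvLbl o == l))))]

-- ===== PRECONDITION & SPEC =====
-- Pre_ excludes exactly the objects without a 'label' key, on which A raises KeyError.
def Pre_split_objects_by_lables (objects : List (List (String × String))) : Prop :=
  (objects.all (fun o => o.any (fun p => p.1 == "label"))) = true
instance (objects : List (List (String × String))) : Decidable (Pre_split_objects_by_lables objects) := by unfold Pre_split_objects_by_lables; infer_instance
def pvWitness_split_objects_by_lables : (List (List (String × String))) :=
  [[("label", "car")], [("label", "dog"), ("id", "3")]]
def Spec_split_objects_by_lables (objects : List (List (String × String))) (out : List (String × List (List (String × String)))) : Prop := out = split_objects_by_lables_alt objects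
instance (objects : List (List (String × String))) (out : List (String × List (List (String × String)))) : Decidable (Spec_split_objects_by_lables objects out) := by unfold Spec_split_objects_by_lables; infer_instance

-- ===== CLAIM (what is proved, stated in full; the proofs are below) =====
def Claim_equal_split_objects_by_lables : Prop := ∀ (objects : List (List (String × String))), Dom_split_objects_by_lables objects → Pre_split_objects_by_lables objects → Spec_split_objects_by_lables objects (split_objects_by_lables objects)

-- ===== LEMMAS AND PROOFS =====

-- each bucket of A's loop is the in-order filter of the matching labels
set_option maxHeartbeats 2000000 in
lemma foldA_eq (t : List (List (String × String))) : ∀ s : StA,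
    t.foldl stepA s =
      { car := s.car ++ t.filter (fun o => pvLbl o == "car"),
        bus := s.bus ++ t.filter (fun o => pvLbl o == "bus"),
        truck := s.truck ++ t.filter (fun o => pvLbl o == "truck"),
        bicycle := s.bicycle ++ t.filter (fun o => pvLbl o == "bicycle"),
        person := s.person ++ t.filter (fun o => pvLbl o == "person"),
        unknown := s.unknown ++ t.filter (fun o => !((pvBuckets.map Prod.fst).any (fun l => pvLbl o == l))),
        bird := s.bird ++ t.filter (fun o => pvLbl o == "bird"),
        potted := s.potted ++ t.filter (fun o => pvLbl o == "potted plant"),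
        cell := s.cell ++ t.filter (fun o => pvLbl o == "cell phone") } := by
  induction t with
  | nil => intro s; simp
  | cons o t ih =>
    intro s
    simp only [List.foldl_cons, ih, List.filter_cons]
    unfold stepA
    split_ifs with h1 h2 h3 h4 h5 h6 h7 h8 <;>
      simp_all [pvBuckets, List.append_assoc]

-- ===== VERDICT (by name: the statement is the Claim_ definition above) =====
theorem split_objects_by_lables_spec : Claim_equal_split_objects_by_lables := by
  intro objects _ _
  unfold Spec_split_objects_by_lables split_objects_by_lables split_objects_by_lables_alt
  simp only [foldA_eq]
  simp [pvBuckets]
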